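-- pv_equiv track=rewrite | github.com/saranyamandava/Top-5-Meaningful-terms-of-an-Etsy-Shop | application.py | get_term_counts
-- ===== SOURCE A (Python) =====
-- def get_term_counts(terms):
--
--     # Input: a list of terms
--     # Output: a hash from term to term count
--
--     term_counts = {}
--     if not terms:
--         return term_counts
--     for term in terms:
--         if term not in term_counts:
--             term_counts[term] = 0
--         term_counts[term] += 1
--     return term_counts
-- ===== SOURCE B (Python) =====
-- def get_term_counts(terms):
--     # Distinct keys (first-occurrence order) first, then one counting scan per key.
--     return {t: terms.count(t) for t in dict.fromkeys(terms)}
-- ===== Notes on version B (the rewrite author's own statement) =====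
-- stated objective: simpler
-- what changed: Replaces A's single running-tally dict pass with a one-line comprehension: dedup the terms in first-occurrence order, then count each distinct term with a separate list scan.
import Mathlib
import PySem

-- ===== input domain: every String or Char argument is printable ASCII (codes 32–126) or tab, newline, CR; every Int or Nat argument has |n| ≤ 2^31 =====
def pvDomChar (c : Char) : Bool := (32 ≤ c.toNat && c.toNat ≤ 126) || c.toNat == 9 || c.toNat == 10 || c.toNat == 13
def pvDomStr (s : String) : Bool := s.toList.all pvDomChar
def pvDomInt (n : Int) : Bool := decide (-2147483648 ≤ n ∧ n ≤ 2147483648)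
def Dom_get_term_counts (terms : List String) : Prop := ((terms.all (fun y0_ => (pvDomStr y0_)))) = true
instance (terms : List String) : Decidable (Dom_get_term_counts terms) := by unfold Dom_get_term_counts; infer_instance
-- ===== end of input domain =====

-- B: distinct-keys pass (dict.fromkeys order) plus a counting scan per key, instead of A's single running-tally pass; same return value.
-- ===== PORT A =====
-- one loop iteration: 'if term not in term_counts: term_counts[term] = 0' then 'term_counts[term] += 1'
def gtcStep (d : PySem.Dict String Int) (term : String) : PySem.Dict String Int :=
  let d' := if d.contains term then d else d.insert term 0
  d'.insert term (d'.getD term 0 + 1)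

def get_term_counts (terms : List String) : List (String × Int) :=
  let term_counts : PySem.Dict String Int := PySem.Dict.empty
  if terms.isEmpty then term_counts.items
  else (terms.foldl gtcStep term_counts).items

-- ===== PORT B =====
def get_term_counts_alt (terms : List String) : List (String × Int) :=
  (PySem.List.dedup terms).map (fun t => (t, (PySem.List.count terms t : Int)))

-- ===== PRECONDITION & SPEC =====
def Spec_get_term_counts (terms : List String) (out : List (String × Int)) : Prop := out = get_term_counts_alt terms
instance (terms : List String) (out : List (String × Int)) : Decidable (Spec_get_term_counts terms out) := by unfold Spec_get_term_counts; infer_instance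

-- ===== CLAIM (what is proved, stated in full; the proofs are below) =====
def Claim_equal_get_term_counts : Prop := ∀ (terms : List String), Dom_get_term_counts terms → Spec_get_term_counts terms (get_term_counts terms)

-- ===== LEMMAS AND PROOFS =====

-- A's loop body is exactly Counter's insert-based update step.
theorem gtcStep_eq_insert (d : PySem.Dict String Int) (t : String) :
    gtcStep d t = d.insert t (d.getD t 0 + 1) := by
  unfold gtcStep
  by_cases h : d.contains t = true
  · simp [h]
  · rw [if_neg h, PySem.Dict.insert_insert_self, PySem.Dict.getD_insert_self,
      PySem.Dict.getD_of_not_contains d 0 (by simpa using h)]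

-- ===== VERDICT (by name: the statement is the Claim_ definition above) =====
theorem get_term_counts_spec : Claim_equal_get_term_counts := by
  intro terms _
  unfold Spec_get_term_counts get_term_counts get_term_counts_alt
  cases terms with
  | nil => simp [PySem.Dict.empty, PySem.List.dedup]
  | cons x xs =>
      simp only [List.isEmpty_cons, if_false, Bool.false_eq_true]
      have hf : gtcStep = fun (d : PySem.Dict String Int) (x : String) => d.insert x (d.getD x 0 + 1) :=
        funext fun d => funext fun t => gtcStep_eq_insert d t
      rw [hf, PySem.Dict.foldl_insert_getD_add_one_eq_counter, PySem.Dict.items_counter,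
        ← PySem.List.dedup_eq_ofList]
      simp [PySem.List.count_eq]
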